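-- pv_equiv track=rewrite | github.com/Querolj/Handwritting-code | framing.py | get_histo_from_matrice
-- ===== SOURCE A (Python) =====
-- def get_histo_from_matrice(matrice):
-- 	histo_x = [0 for i in range(len(matrice))]
-- 	histo_y = [0 for i in range(len(matrice[0]))]
--
-- 	for x in range(len(matrice)):
-- 		for y in range(len(matrice[0])):
-- 			if matrice[x][y] == 0:
-- 				histo_x[x] = histo_x[x] + 1
-- 				histo_y[y] = histo_y[y] + 1
-- 	return (histo_x, histo_y)
-- ===== SOURCE B (Python) =====
-- def get_histo_from_matrice(matrice):
--     n = len(matrice)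
--     m = len(matrice[0])
--     histo_x = [sum(1 for y in range(m) if matrice[x][y] == 0) for x in range(n)]
--     histo_y = [sum(1 for x in range(n) if matrice[x][y] == 0) for y in range(m)]
--     return (histo_x, histo_y)
-- ===== Notes on version B (the rewrite author's own statement) =====
-- stated objective: simpler
-- what changed: A fills two mutable histograms in one fused nested loop; B builds each histogram in its own pass as a comprehension (row counts, then column counts), with no shared mutable state.
import Mathlib
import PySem

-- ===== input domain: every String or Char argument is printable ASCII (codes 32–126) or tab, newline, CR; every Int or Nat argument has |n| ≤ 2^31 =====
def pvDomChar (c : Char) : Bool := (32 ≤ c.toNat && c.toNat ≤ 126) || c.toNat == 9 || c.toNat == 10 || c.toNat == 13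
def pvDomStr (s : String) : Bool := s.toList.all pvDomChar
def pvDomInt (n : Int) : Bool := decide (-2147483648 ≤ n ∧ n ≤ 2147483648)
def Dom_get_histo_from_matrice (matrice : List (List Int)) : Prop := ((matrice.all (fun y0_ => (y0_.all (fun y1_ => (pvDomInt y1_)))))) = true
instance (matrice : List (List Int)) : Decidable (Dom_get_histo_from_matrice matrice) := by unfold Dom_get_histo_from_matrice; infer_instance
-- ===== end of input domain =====

-- ===== PORT A =====
-- B changes the decomposition: two independent per-row / per-column counting passes
-- instead of A's single fused loop mutating two histograms. Objective: simpler.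

-- shared index helper: matrice[x][y]; the default is never reached under Pre_
def pvCell (matrice : List (List Int)) (x y : Nat) : Int :=
  ((matrice[x]?.getD [])[y]?).getD 1

def get_histo_from_matrice (matrice : List (List Int)) : List Int × List Int :=
  -- len(matrice[0]) raises IndexError on an empty matrice; excluded by Pre_
  let n := matrice.length
  let m := (matrice.headD []).length
  let histo_x := List.replicate n (0 : Int)
  let histo_y := List.replicate m (0 : Int)
  (List.range n).foldl (fun h x =>
    (List.range m).foldl (fun h y =>
      if pvCell matrice x y == 0 then
        (h.1.set x (h.1.getD x 0 + 1), h.2.set y (h.2.getD y 0 + 1))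
      else h) h) (histo_x, histo_y)

-- ===== PORT B =====
def get_histo_from_matrice_alt (matrice : List (List Int)) : List Int × List Int :=
  let n := matrice.length
  let m := (matrice.headD []).length
  ((List.range n).map (fun x =>
      (((List.range m).filter (fun y => pvCell matrice x y == 0)).length : Int)),
   (List.range m).map (fun y =>
      (((List.range n).filter (fun x => pvCell matrice x y == 0)).length : Int)))

-- ===== PRECONDITION & SPEC =====
-- Pre_ excludes exactly the inputs where A raises IndexError: the empty matrix
-- (matrice[0]) and ragged matrices with a row shorter than the first row.
def Pre_get_histo_from_matrice (matrice : List (List Int)) : Prop :=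
  matrice ≠ [] ∧ ∀ row ∈ matrice, (matrice.headD []).length ≤ row.length
instance (matrice : List (List Int)) : Decidable (Pre_get_histo_from_matrice matrice) := by unfold Pre_get_histo_from_matrice; infer_instance
def pvWitness_get_histo_from_matrice : List (List Int) := [[0, 1], [2, 0]]
def Spec_get_histo_from_matrice (matrice : List (List Int)) (out : List Int × List Int) : Prop := out = get_histo_from_matrice_alt matrice
instance (matrice : List (List Int)) (out : List Int × List Int) : Decidable (Spec_get_histo_from_matrice matrice out) := by unfold Spec_get_histo_from_matrice; infer_instance

-- ===== CLAIM (what is proved, stated in full; the proofs are below) =====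
def Claim_equal_get_histo_from_matrice : Prop := ∀ (matrice : List (List Int)), Dom_get_histo_from_matrice matrice → Pre_get_histo_from_matrice matrice → Spec_get_histo_from_matrice matrice (get_histo_from_matrice matrice)

-- ===== LEMMAS AND PROOFS =====

-- a fold whose step acts componentwise on a pair splits into two folds
theorem pv_foldl_prod {α β ι : Type} (f : α → ι → α) (g : β → ι → β) :
    ∀ (L : List ι) (a : α) (b : β),
      L.foldl (fun h i => (f h.1 i, g h.2 i)) (a, b) = (L.foldl f a, L.foldl g b) := by
  intro L
  induction L with
  | nil => intro a b; rfl
  | cons i L ih => intro a b; simp [List.foldl, ih]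

-- the inner loop restricted to the first histogram: it only bumps index x
theorem pv_inner1 (q : Nat → Nat → Bool) (x : Nat) :
    ∀ (L : List Nat) (h1 : List Int), x < h1.length →
      L.foldl (fun h y => if q x y then h.set x (h.getD x 0 + 1) else h) h1
        = h1.set x (h1.getD x 0 + ((L.filter (q x)).length : Int)) := by
  intro L
  induction L with
  | nil =>
      intro h1 hx
      simp [List.getElem?_eq_getElem hx, List.set_getElem_self]
  | cons y L ih =>
      intro h1 hx
      by_cases hq : q x y
      · have hlen : x < (h1.set x (h1.getD x 0 + 1)).length := by simpa using hx
        simp only [List.foldl_cons, hq, if_pos]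
        rw [ih _ hlen]
        simp [List.getD_eq_getElem, hx, List.getElem_set_self, List.set_set,
              List.filter_cons, hq]
        ring
      · simp only [List.foldl_cons, hq, if_neg, Bool.false_eq_true, not_false_iff]
        rw [ih _ hx]
        simp [List.filter_cons, hq]

-- outer fold for the first histogram over range k
theorem pv_outer1 (q : Nat → Nat → Bool) (n : Nat) (cnt : Nat → Int)
    (step : List Int → Nat → List Int)
    (hstep : ∀ h1 x, x < h1.length → step h1 x = h1.set x (h1.getD x 0 + cnt x)) :
    ∀ (k : Nat), k ≤ n →
      (List.range k).foldl step (List.replicate n (0 : Int))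
        = (List.range n).map (fun i => if i < k then cnt i else 0) := by
  intro k
  induction k with
  | zero =>
      intro _
      apply List.ext_getElem <;> simp
  | succ k ih =>
      intro hk
      have hk' : k ≤ n := Nat.le_of_succ_le hk
      have hkn : k < n := hk
      rw [List.range_succ, List.foldl_append, ih hk']
      have hlen : k < ((List.range n).map (fun i => if i < k then cnt i else 0)).length := by
        simpa using hkn
      rw [List.foldl_cons, List.foldl_nil, hstep _ _ hlen]
      have e0 : ((List.range n).map (fun j => if j < k then cnt j else 0)).getD k 0 = 0 := by
        rw [List.getD_eq_getElem _ 0 hlen]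
        simp
      apply List.ext_getElem
      · simp
      · intro i hi hi2
        have hin : i < n := by simpa using hi2
        by_cases hik : i = k
        · subst hik
          simp [List.getElem_set_self, hin]
        · have hne : k ≠ i := fun h => hik h.symm
          rw [List.getElem_set_ne hne]
          simp only [List.getElem_map, List.getElem_range]
          split_ifs with h1 h2 <;> first | rfl | omega

-- inner loop restricted to the second histogram, pointwise, for nodup index lists
theorem pv_inner2_len (q : Nat → Nat → Bool) (x : Nat) :
    ∀ (L : List Nat) (h2 : List Int),
      (L.foldl (fun h y => if q x y then h.set y (h.getD y 0 + 1) else h) h2).length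
        = h2.length := by
  intro L
  induction L with
  | nil => intro h2; rfl
  | cons y L ih =>
      intro h2
      by_cases hq : q x y
      · rw [List.foldl_cons, if_pos hq, ih, List.length_set]
      · rw [List.foldl_cons, if_neg hq, ih]

theorem pv_inner2 (q : Nat → Nat → Bool) (x : Nat) :
    ∀ (L : List Nat), L.Nodup → ∀ (h2 : List Int), (∀ y ∈ L, y < h2.length) →
      ∀ j, j < h2.length →
      (L.foldl (fun h y => if q x y then h.set y (h.getD y 0 + 1) else h) h2).getD j 0
        = h2.getD j 0 + (if j ∈ L ∧ q x j then 1 else 0) := by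
  intro L
  induction L with
  | nil => intro _ h2 _ j hj; simp
  | cons y L ih =>
      intro hnd h2 hb j hj
      have hnd' : L.Nodup := hnd.of_cons
      have hyL : y ∉ L := by simpa using (List.nodup_cons.mp hnd).1
      by_cases hq : q x y
      · have hy : y < h2.length := hb y (by simp)
        have hb' : ∀ z ∈ L, z < (h2.set y (h2.getD y 0 + 1)).length := by
          intro z hz; simpa using hb z (by simp [hz])
        have hj' : j < (h2.set y (h2.getD y 0 + 1)).length := by simpa using hj
        rw [List.foldl_cons, if_pos hq, ih hnd' _ hb' j hj']
        by_cases hjy : j = y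
        · subst hjy
          have e1 : (h2.set j (h2.getD j 0 + 1)).getD j 0 = h2.getD j 0 + 1 := by
            rw [List.getD_eq_getElem _ 0 hj', List.getElem_set_self _]
          rw [e1]
          simp [hyL, hq]
        · have hne : j ≠ y := hjy
          have e1 : (h2.set y (h2.getD y 0 + 1)).getD j 0 = h2.getD j 0 := by
            rw [List.getD_eq_getElem _ 0 hj', List.getD_eq_getElem _ 0 hj]
            exact List.getElem_set_ne (fun h => hne h.symm) _
          rw [e1]
          simp [List.mem_cons, hjy]
      · rw [List.foldl_cons, if_neg hq,
            ih hnd' _ (fun z hz => hb z (List.mem_cons_of_mem _ hz)) j hj]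
        have hiff : (j ∈ y :: L ∧ q x j) ↔ (j ∈ L ∧ q x j) := by
          constructor
          · rintro ⟨hm, hqj⟩
            rcases List.mem_cons.mp hm with h | h
            · exact absurd hqj (by simpa [h] using hq)
            · exact ⟨h, hqj⟩
          · rintro ⟨hm, hqj⟩; exact ⟨List.mem_cons_of_mem _ hm, hqj⟩
        rw [if_congr hiff rfl rfl]

-- one row-step of the second histogram, on lists of length m
theorem pv_rowstep (q : Nat → Nat → Bool) (m : Nat) (x : Nat) (h2 : List Int)
    (hl : h2.length = m) (j : Nat) (hj : j < m) :
    ((List.range m).foldl (fun h y => if q x y then h.set y (h.getD y 0 + 1) else h) h2).getD j 0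
      = h2.getD j 0 + (if q x j then 1 else 0) := by
  have := pv_inner2 q x (List.range m) (List.nodup_range) h2
    (by intro y hy; simpa [hl] using List.mem_range.mp hy) j (by omega)
  simpa [List.mem_range, hj] using this

-- outer fold for the second histogram, pointwise
theorem pv_outer2 (q : Nat → Nat → Bool) (m : Nat) :
    ∀ (X : List Nat) (h2 : List Int), h2.length = m →
      (X.foldl (fun h x => (List.range m).foldl
          (fun h y => if q x y then h.set y (h.getD y 0 + 1) else h) h) h2).length = m ∧
      ∀ j, j < m →
      (X.foldl (fun h x => (List.range m).foldl
          (fun h y => if q x y then h.set y (h.getD y 0 + 1) else h) h) h2).getD j 0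
        = h2.getD j 0 + ((X.filter (fun x => q x j)).length : Int) := by
  intro X
  induction X with
  | nil => intro h2 hl; exact ⟨hl, by intro j _; simp⟩
  | cons x X ih =>
      intro h2 hl
      have hl' : ((List.range m).foldl
          (fun h y => if q x y then h.set y (h.getD y 0 + 1) else h) h2).length = m := by
        rw [pv_inner2_len]; exact hl
      obtain ⟨hL, hP⟩ := ih _ hl'
      refine ⟨by simpa [List.foldl_cons] using hL, ?_⟩
      intro j hj
      rw [List.foldl_cons, hP j hj, pv_rowstep q m x h2 hl j hj]
      by_cases hq : q x j <;> simp [List.filter_cons, hq] <;> ring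

-- A's fused fold splits into the two independent folds
theorem pv_split (matrice : List (List Int)) :
    get_histo_from_matrice matrice
      = ((List.range matrice.length).foldl
           (fun h1 x => (List.range (matrice.headD []).length).foldl
             (fun h y => if pvCell matrice x y == 0 then h.set x (h.getD x 0 + 1) else h) h1)
           (List.replicate matrice.length (0 : Int)),
         (List.range matrice.length).foldl
           (fun h2 x => (List.range (matrice.headD []).length).foldl
             (fun h y => if pvCell matrice x y == 0 then h.set y (h.getD y 0 + 1) else h) h2)
           (List.replicate (matrice.headD []).length (0 : Int))) := by
  unfold get_histo_from_matrice
  have hinner : ∀ (x : Nat) (h : List Int × List Int),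
      (List.range (matrice.headD []).length).foldl
        (fun h y => if pvCell matrice x y == 0 then
            (h.1.set x (h.1.getD x 0 + 1), h.2.set y (h.2.getD y 0 + 1)) else h) h
      = ((List.range (matrice.headD []).length).foldl
           (fun h y => if pvCell matrice x y == 0 then h.set x (h.getD x 0 + 1) else h) h.1,
         (List.range (matrice.headD []).length).foldl
           (fun h y => if pvCell matrice x y == 0 then h.set y (h.getD y 0 + 1) else h) h.2) := by
    intro x h
    have : (fun (h : List Int × List Int) (y : Nat) =>
        if pvCell matrice x y == 0 then
          (h.1.set x (h.1.getD x 0 + 1), h.2.set y (h.2.getD y 0 + 1)) else h)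
      = (fun (h : List Int × List Int) (y : Nat) =>
          ((fun a y => if pvCell matrice x y == 0 then a.set x (a.getD x 0 + 1) else a) h.1 y,
           (fun b y => if pvCell matrice x y == 0 then b.set y (b.getD y 0 + 1) else b) h.2 y)) := by
      funext h y
      by_cases hq : pvCell matrice x y == 0 <;> simp [hq]
    rw [this]
    rcases h with ⟨a, b⟩
    exact pv_foldl_prod
      (fun u y => if pvCell matrice x y == 0 then u.set x (u.getD x 0 + 1) else u)
      (fun v y => if pvCell matrice x y == 0 then v.set y (v.getD y 0 + 1) else v)
      (List.range (matrice.headD []).length) a b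
  have : (fun (h : List Int × List Int) (x : Nat) =>
      (List.range (matrice.headD []).length).foldl
        (fun h y => if pvCell matrice x y == 0 then
            (h.1.set x (h.1.getD x 0 + 1), h.2.set y (h.2.getD y 0 + 1)) else h) h)
    = (fun (h : List Int × List Int) (x : Nat) =>
        ((fun h1 x => (List.range (matrice.headD []).length).foldl
            (fun h y => if pvCell matrice x y == 0 then h.set x (h.getD x 0 + 1) else h) h1) h.1 x,
         (fun h2 x => (List.range (matrice.headD []).length).foldl
            (fun h y => if pvCell matrice x y == 0 then h.set y (h.getD y 0 + 1) else h) h2) h.2 x)) := by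
    funext h x
    exact hinner x h
  simp only [this]
  exact pv_foldl_prod
    (fun h1 x => (List.range (matrice.headD []).length).foldl
        (fun h y => if pvCell matrice x y == 0 then h.set x (h.getD x 0 + 1) else h) h1)
    (fun h2 x => (List.range (matrice.headD []).length).foldl
        (fun h y => if pvCell matrice x y == 0 then h.set y (h.getD y 0 + 1) else h) h2)
    (List.range matrice.length) (List.replicate matrice.length (0 : Int))
    (List.replicate (matrice.headD []).length (0 : Int))

-- ===== VERDICT (by name: the statement is the Claim_ definition above) =====
theorem get_histo_from_matrice_spec : Claim_equal_get_histo_from_matrice := by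
  intro matrice _ _
  unfold Spec_get_histo_from_matrice
  show get_histo_from_matrice matrice =
    ((List.range matrice.length).map (fun x =>
        (((List.range (matrice.headD []).length).filter
            (fun y => pvCell matrice x y == 0)).length : Int)),
     (List.range (matrice.headD []).length).map (fun y =>
        (((List.range matrice.length).filter
            (fun x => pvCell matrice x y == 0)).length : Int)))
  rw [pv_split, Prod.mk.injEq]
  constructor
  · rw [pv_outer1 (fun x y => pvCell matrice x y == 0) matrice.length
        (fun x => (((List.range (matrice.headD []).length).filter
            (fun y => pvCell matrice x y == 0)).length : Int))
        (fun h1 x => (List.range (matrice.headD []).length).foldl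
            (fun h y => if pvCell matrice x y == 0 then h.set x (h.getD x 0 + 1) else h) h1)
        (fun h1 x hx => pv_inner1 (fun x y => pvCell matrice x y == 0) x
            (List.range (matrice.headD []).length) h1 hx)
        matrice.length (le_refl _)]
    refine List.map_congr_left ?_
    intro i hi
    simp [List.mem_range.mp hi]
  · obtain ⟨hL, hP⟩ := pv_outer2 (fun x y => pvCell matrice x y == 0)
      (matrice.headD []).length (List.range matrice.length)
      (List.replicate (matrice.headD []).length (0 : Int)) (by simp)
    apply List.ext_getElem
    · rw [hL]; simp
    · intro j hj hj2
      have hjm : j < (matrice.headD []).length := by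
        have := hj; rw [hL] at this; exact this
      have hP' := hP j hjm
      rw [List.getD_eq_getElem _ 0 hj] at hP'
      have hrep : (List.replicate (matrice.headD []).length (0 : Int)).getD j 0 = 0 := by
        simp
      rw [hP', hrep, zero_add]
      simp
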